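-- pv_equiv track=rewrite | github.com/DylanZhao123/JobScrapper | main_old.py | detect_country_from_locations
-- ===== SOURCE A (Python) =====
-- def detect_country_from_locations(locations):
--     """从地点列表中检测国家（用于单个地点列表）"""
--     uk_keywords = ["United Kingdom", "England", "Scotland", "Wales", "Northern Ireland"]
--     ca_keywords = ["Canada", "Ontario", "British Columbia", "Quebec", "Alberta"]
--     sg_keywords = ["Singapore"]
--     hk_keywords = ["Hong Kong"]
--
--     for location in locations:
--         location_str = str(location).lower()
--         if any(kw.lower() in location_str for kw in uk_keywords):
--             return "uk"
--         elif any(kw.lower() in location_str for kw in ca_keywords):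
--             return "ca"
--         elif any(kw.lower() in location_str for kw in sg_keywords):
--             return "sg"
--         elif any(kw.lower() in location_str for kw in hk_keywords):
--             return "hk"
--     return "us"  # Default to US
-- ===== SOURCE B (Python) =====
-- _GROUPS = [
--     ("uk", ["united kingdom", "england", "scotland", "wales", "northern ireland"]),
--     ("ca", ["canada", "ontario", "british columbia", "quebec", "alberta"]),
--     ("sg", ["singapore"]),
--     ("hk", ["hong kong"]),
-- ]
--
-- def _first_match_index(kws, lowered):
--     for i, s in enumerate(lowered):
--         if any(k in s for k in kws):
--             return i
--     return None
--
-- def detect_country_from_locations(locations):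
--     # Transposed loops: one pass per country group computing the first matching
--     # location index, then the country with the smallest index wins; ties go to
--     # the higher-priority group via the reversed fold with '<='.
--     lowered = [str(l).lower() for l in locations]
--     best_country, best_idx = "us", len(lowered)
--     for country, kws in reversed(_GROUPS):
--         idx = _first_match_index(kws, lowered)
--         if idx is not None and idx <= best_idx:
--             best_country, best_idx = country, idx
--     return best_country
-- ===== Notes on version B (the rewrite author's own statement) =====
-- stated objective: alternative
-- what changed: Transposes the loops: instead of scanning locations and testing the four country groups per location with an early return, B runs one staged pass per country group computing the index of the first matching location, then selects the country with the smallest index (ties broken toward higher-priority groups by a reversed fold with <=), defaulting to 'us'.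
import Mathlib
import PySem

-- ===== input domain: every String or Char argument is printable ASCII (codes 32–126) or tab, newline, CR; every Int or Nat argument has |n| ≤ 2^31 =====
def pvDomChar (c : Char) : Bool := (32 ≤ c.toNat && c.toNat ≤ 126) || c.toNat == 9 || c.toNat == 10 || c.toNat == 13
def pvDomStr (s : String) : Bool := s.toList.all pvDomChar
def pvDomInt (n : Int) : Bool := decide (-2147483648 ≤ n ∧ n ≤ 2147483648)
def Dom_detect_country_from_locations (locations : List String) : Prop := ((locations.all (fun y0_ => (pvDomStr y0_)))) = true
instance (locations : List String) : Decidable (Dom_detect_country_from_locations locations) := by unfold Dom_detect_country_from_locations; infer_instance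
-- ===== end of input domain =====

-- B transposes the loops: one staged pass per country group finding the first matching
-- location index, then the smallest index wins (ties to the higher-priority group);
-- objective: alternative algorithm, same cost.

-- ===== PORT A =====
def detect_country_from_locations : List String → String
  | [] => "us"
  | location :: rest =>
    let location_str := PySem.Str.lower location
    if ["United Kingdom", "England", "Scotland", "Wales", "Northern Ireland"].any
        (fun kw => PySem.Str.isIn (PySem.Str.lower kw) location_str) then "uk"
    else if ["Canada", "Ontario", "British Columbia", "Quebec", "Alberta"].any
        (fun kw => PySem.Str.isIn (PySem.Str.lower kw) location_str) then "ca"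
    else if ["Singapore"].any
        (fun kw => PySem.Str.isIn (PySem.Str.lower kw) location_str) then "sg"
    else if ["Hong Kong"].any
        (fun kw => PySem.Str.isIn (PySem.Str.lower kw) location_str) then "hk"
    else detect_country_from_locations rest

-- ===== PORT B =====
def pvGroups : List (String × List String) :=
  [("uk", ["united kingdom", "england", "scotland", "wales", "northern ireland"]),
   ("ca", ["canada", "ontario", "british columbia", "quebec", "alberta"]),
   ("sg", ["singapore"]),
   ("hk", ["hong kong"])]

-- _first_match_index: index of the first element of the list matched by any keyword
def pvFirstMatchIdx (kws : List String) (i : Nat) : List String → Option Nat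
  | [] => none
  | s :: rest =>
    if kws.any (fun k => PySem.Str.isIn k s) then some i
    else pvFirstMatchIdx kws (i + 1) rest

-- body of B's loop over reversed(_GROUPS)
def pvStepF (lowered : List String) (best : String × Nat) (g : String × List String) :
    String × Nat :=
  match pvFirstMatchIdx g.2 0 lowered with
  | none => best
  | some idx => if idx ≤ best.2 then (g.1, idx) else best

def detect_country_from_locations_alt (locations : List String) : String :=
  let lowered := locations.map PySem.Str.lower
  (pvGroups.reverse.foldl (pvStepF lowered) ("us", lowered.length)).1

-- ===== PRECONDITION & SPEC =====
def Spec_detect_country_from_locations (locations : List String) (out : String) : Prop := out = detect_country_from_locations_alt locations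
instance (locations : List String) (out : String) : Decidable (Spec_detect_country_from_locations locations out) := by unfold Spec_detect_country_from_locations; infer_instance

-- ===== CLAIM (what is proved, stated in full; the proofs are below) =====
def Claim_equal_detect_country_from_locations : Prop := ∀ (locations : List String), Dom_detect_country_from_locations locations → Spec_detect_country_from_locations locations (detect_country_from_locations locations)

-- ===== LEMMAS AND PROOFS =====

-- the enumerate counter only shifts the returned index
lemma pvFirstMatchIdx_shift (kws : List String) :
    ∀ (ls : List String) (i : Nat),
      pvFirstMatchIdx kws i ls = (pvFirstMatchIdx kws 0 ls).map (· + i) := by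
  intro ls
  induction ls with
  | nil => intro i; simp [pvFirstMatchIdx]
  | cons s rest ih =>
    intro i
    simp only [pvFirstMatchIdx]
    by_cases h : (kws.any fun k => PySem.Str.isIn k s) = true
    · simp only [h, if_pos]; simp
    · simp only [h, Bool.false_eq_true, if_neg, not_false_iff, ih (i + 1), ih 1]
      cases pvFirstMatchIdx kws 0 rest <;> simp <;> omega

lemma pvFirstMatchIdx_cons (kws : List String) (s : String) (ls : List String) :
    pvFirstMatchIdx kws 0 (s :: ls) =
      if kws.any (fun k => PySem.Str.isIn k s) then some 0
      else (pvFirstMatchIdx kws 0 ls).map (· + 1) := by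
  simp only [pvFirstMatchIdx, Nat.zero_add]
  by_cases h : (kws.any fun k => PySem.Str.isIn k s) = true
  · simp only [h, if_pos]
  · simp only [h, Bool.false_eq_true, if_neg, not_false_iff, pvFirstMatchIdx_shift kws ls 1]

-- if no group matches the head, the whole fold just shifts every index by one
lemma pvFold_shift (gs : List (String × List String)) (s : String) :
    ∀ (ls : List String) (c : String) (n : Nat),
      (∀ g ∈ gs, (g.2).any (fun k => PySem.Str.isIn k s) = false) →
      gs.foldl (pvStepF (s :: ls)) (c, n + 1) =
        ((gs.foldl (pvStepF ls) (c, n)).1, (gs.foldl (pvStepF ls) (c, n)).2 + 1) := by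
  induction gs with
  | nil => intro ls c n _; simp
  | cons g gs ih =>
    intro ls c n hno
    have hg : (g.2).any (fun k => PySem.Str.isIn k s) = false := hno g (by simp)
    have hstep : pvStepF (s :: ls) (c, n + 1) g =
        ((pvStepF ls (c, n) g).1, (pvStepF ls (c, n) g).2 + 1) := by
      simp only [pvStepF, pvFirstMatchIdx_cons, hg, if_neg, Bool.false_eq_true,
        not_false_iff]
      cases pvFirstMatchIdx g.2 0 ls with
      | none => simp
      | some i =>
        simp only [Option.map_some]
        by_cases h : i ≤ n
        · simp [h, Nat.add_le_add_iff_right.mpr h]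
        · have : ¬ i + 1 ≤ n + 1 := by omega
          simp [h, this]
    simp only [List.foldl_cons, hstep]
    exact ih ls (pvStepF ls (c, n) g).1 (pvStepF ls (c, n) g).2
      (fun g' hg' => hno g' (by simp [hg']))

-- per-location step lemmas: a group matching the head wins with index 0;
-- a non-matching group cannot beat a best index of 0
lemma pvStep_match_zero (s : String) (ls : List String) (b : String × Nat)
    (g : String × List String) (h : (g.2).any (fun k => PySem.Str.isIn k s) = true) :
    pvStepF (s :: ls) b g = (g.1, 0) := by
  simp only [pvStepF, pvFirstMatchIdx_cons, h]
  simp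

lemma pvStep_noMatch_zero (s : String) (ls : List String) (c : String)
    (g : String × List String) (h : (g.2).any (fun k => PySem.Str.isIn k s) = false) :
    pvStepF (s :: ls) (c, 0) g = (c, 0) := by
  simp only [pvStepF, pvFirstMatchIdx_cons, h, Bool.false_eq_true, if_neg, not_false_iff]
  cases pvFirstMatchIdx g.2 0 ls <;> simp

lemma pvGroups_reverse : pvGroups.reverse =
    [("hk", ["hong kong"]),
     ("sg", ["singapore"]),
     ("ca", ["canada", "ontario", "british columbia", "quebec", "alberta"]),
     ("uk", ["united kingdom", "england", "scotland", "wales", "northern ireland"])] := by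
  decide

lemma pvEq : ∀ (locations : List String),
    detect_country_from_locations locations = detect_country_from_locations_alt locations
  | [] => by decide
  | location :: rest => by
    have ih := pvEq rest
    have e1 : PySem.Str.lower "United Kingdom" = "united kingdom" := by decide
    have e2 : PySem.Str.lower "England" = "england" := by decide
    have e3 : PySem.Str.lower "Scotland" = "scotland" := by decide
    have e4 : PySem.Str.lower "Wales" = "wales" := by decide
    have e5 : PySem.Str.lower "Northern Ireland" = "northern ireland" := by decide
    have e6 : PySem.Str.lower "Canada" = "canada" := by decide
    have e7 : PySem.Str.lower "Ontario" = "ontario" := by decide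
    have e8 : PySem.Str.lower "British Columbia" = "british columbia" := by decide
    have e9 : PySem.Str.lower "Quebec" = "quebec" := by decide
    have e10 : PySem.Str.lower "Alberta" = "alberta" := by decide
    have e11 : PySem.Str.lower "Singapore" = "singapore" := by decide
    have e12 : PySem.Str.lower "Hong Kong" = "hong kong" := by decide
    set s := PySem.Str.lower location with hs
    set ls := rest.map PySem.Str.lower with hls
    -- A's runtime-lowered keyword tests coincide with B's pre-lowered group tests
    have cU : (["United Kingdom", "England", "Scotland", "Wales", "Northern Ireland"].any
          (fun kw => PySem.Str.isIn (PySem.Str.lower kw) s)) =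
        (["united kingdom", "england", "scotland", "wales", "northern ireland"].any
          (fun k => PySem.Str.isIn k s)) := by
      simp only [List.any_cons, List.any_nil, e1, e2, e3, e4, e5]
    have cC : (["Canada", "Ontario", "British Columbia", "Quebec", "Alberta"].any
          (fun kw => PySem.Str.isIn (PySem.Str.lower kw) s)) =
        (["canada", "ontario", "british columbia", "quebec", "alberta"].any
          (fun k => PySem.Str.isIn k s)) := by
      simp only [List.any_cons, List.any_nil, e6, e7, e8, e9, e10]
    have cS : (["Singapore"].any (fun kw => PySem.Str.isIn (PySem.Str.lower kw) s)) =
        (["singapore"].any (fun k => PySem.Str.isIn k s)) := by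
      simp only [List.any_cons, List.any_nil, e11]
    have cH : (["Hong Kong"].any (fun kw => PySem.Str.isIn (PySem.Str.lower kw) s)) =
        (["hong kong"].any (fun k => PySem.Str.isIn k s)) := by
      simp only [List.any_cons, List.any_nil, e12]
    have hAlt : detect_country_from_locations_alt (location :: rest) =
        (List.foldl (pvStepF (s :: ls)) ("us", ls.length + 1) pvGroups.reverse).1 := rfl
    have hAltR : detect_country_from_locations_alt rest =
        (List.foldl (pvStepF ls) ("us", ls.length) pvGroups.reverse).1 := rfl
    rw [hAlt]
    simp only [detect_country_from_locations, ← hs, cU, cC, cS, cH]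
    cases hU : (["united kingdom", "england", "scotland", "wales", "northern ireland"].any
        (fun k => PySem.Str.isIn k s)) with
    | true =>
      rw [pvGroups_reverse]
      simp only [List.foldl_cons, List.foldl_nil]
      rw [pvStep_match_zero s ls _
        ("uk", ["united kingdom", "england", "scotland", "wales", "northern ireland"]) hU]
      simp
    | false =>
    cases hC : (["canada", "ontario", "british columbia", "quebec", "alberta"].any
        (fun k => PySem.Str.isIn k s)) with
    | true =>
      rw [pvGroups_reverse]
      simp only [List.foldl_cons, List.foldl_nil]
      rw [pvStep_match_zero s ls _
          ("ca", ["canada", "ontario", "british columbia", "quebec", "alberta"]) hC,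
        pvStep_noMatch_zero s ls _
          ("uk", ["united kingdom", "england", "scotland", "wales", "northern ireland"]) hU]
      simp
    | false =>
    cases hS : (["singapore"].any (fun k => PySem.Str.isIn k s)) with
    | true =>
      rw [pvGroups_reverse]
      simp only [List.foldl_cons, List.foldl_nil]
      rw [pvStep_match_zero s ls _ ("sg", ["singapore"]) hS,
        pvStep_noMatch_zero s ls _
          ("ca", ["canada", "ontario", "british columbia", "quebec", "alberta"]) hC,
        pvStep_noMatch_zero s ls _
          ("uk", ["united kingdom", "england", "scotland", "wales", "northern ireland"]) hU]
      simp
    | false =>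
    cases hH : (["hong kong"].any (fun k => PySem.Str.isIn k s)) with
    | true =>
      rw [pvGroups_reverse]
      simp only [List.foldl_cons, List.foldl_nil]
      rw [pvStep_match_zero s ls _ ("hk", ["hong kong"]) hH,
        pvStep_noMatch_zero s ls _ ("sg", ["singapore"]) hS,
        pvStep_noMatch_zero s ls _
          ("ca", ["canada", "ontario", "british columbia", "quebec", "alberta"]) hC,
        pvStep_noMatch_zero s ls _
          ("uk", ["united kingdom", "england", "scotland", "wales", "northern ireland"]) hU]
      simp
    | false =>
      -- no group matches the head: A recurses and all of B's indices shift by one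
      have hshift := pvFold_shift pvGroups.reverse s ls "us" ls.length
        (by
          intro g hg
          rw [pvGroups_reverse] at hg
          simp only [List.mem_cons, List.not_mem_nil, or_false] at hg
          rcases hg with h | h | h | h <;> subst h <;> [exact hH; exact hS; exact hC; exact hU])
      simp only [hU, hC, hS, hH, Bool.false_eq_true, if_false]
      rw [ih, hAltR, hshift]

-- ===== VERDICT (by name: the statement is the Claim_ definition above) =====
theorem detect_country_from_locations_spec : Claim_equal_detect_country_from_locations := by
  intro locations _
  unfold Spec_detect_country_from_locations
  exact pvEq locations
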